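-- pv_equiv track=rewrite | github.com/abhishekwebcode/leetcode | check-if-numbers-are-ascending-in-a-sentence/check-if-numbers-are-ascending-in-a-sentence.py | areNumbersAscending
-- ===== SOURCE A (Python) =====
-- def areNumbersAscending(s: str) -> bool:
--     prev = None
--     for word in s.split(' '):
--         try:
--             i = int(word)
--             if prev is not None and not (i>prev):
--                 return False
--             prev = i
--         except:
--             pass
--     return True
-- ===== SOURCE B (Python) =====
-- def areNumbersAscending(s: str) -> bool:
--     nums = []
--     for word in s.split(' '):
--         try:
--             nums.append(int(word))
--         except:
--             pass
--     return all(a < b for a, b in zip(nums, nums[1:]))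
-- ===== Notes on version B (the rewrite author's own statement) =====
-- stated objective: simpler
-- what changed: Replaces A's fused single-pass early-return accumulator with a materialize-then-compare decomposition: first collect all int-parseable tokens into a list, then check pairwise strict ascent with zip/all.
import Mathlib
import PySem

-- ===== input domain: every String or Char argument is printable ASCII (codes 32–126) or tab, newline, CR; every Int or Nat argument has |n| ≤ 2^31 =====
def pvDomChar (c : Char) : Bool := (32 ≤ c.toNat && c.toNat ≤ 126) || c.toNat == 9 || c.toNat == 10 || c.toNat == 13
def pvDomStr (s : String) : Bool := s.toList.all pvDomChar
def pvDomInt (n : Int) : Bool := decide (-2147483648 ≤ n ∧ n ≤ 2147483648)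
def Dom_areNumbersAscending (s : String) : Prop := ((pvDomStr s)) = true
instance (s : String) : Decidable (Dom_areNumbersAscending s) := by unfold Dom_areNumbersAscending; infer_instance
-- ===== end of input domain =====

-- B: materialize the parsed integers, then check pairwise ascent in a second pass (simpler decomposition).
-- ===== PORT A =====
-- loop with early return: prev is the last parsed integer (none before the first)
def pvGoA : List String → Option Int → Bool
  | [], _ => true
  | w :: ws, prev =>
    match PySem.Int.ofStr? w with
    | some i =>
      match prev with
      | some p => if ¬ (i > p) then false else pvGoA ws (some i)
      | none => pvGoA ws (some i)
    | none => pvGoA ws prev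

def areNumbersAscending (s : String) : Bool :=
  pvGoA (((PySem.Str.split? s " ").getD [])) none

-- ===== PORT B =====
def areNumbersAscending_alt (s : String) : Bool :=
  let nums := (((PySem.Str.split? s " ").getD [])).filterMap PySem.Int.ofStr?
  (nums.zip (nums.drop 1)).all (fun p => decide (p.1 < p.2))

-- ===== PRECONDITION & SPEC =====
def Spec_areNumbersAscending (s : String) (out : Bool) : Prop := out = areNumbersAscending_alt s
instance (s : String) (out : Bool) : Decidable (Spec_areNumbersAscending s out) := by unfold Spec_areNumbersAscending; infer_instance

-- ===== CLAIM (what is proved, stated in full; the proofs are below) =====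
def Claim_equal_areNumbersAscending : Prop := ∀ (s : String), Dom_areNumbersAscending s → Spec_areNumbersAscending s (areNumbersAscending s)

-- ===== LEMMAS AND PROOFS =====

-- chk l prev: the ascent check over the already-parsed integers l, with prev the last one seen
def pvChk : List Int → Option Int → Bool
  | [], _ => true
  | x :: xs, none => pvChk xs (some x)
  | x :: xs, some p => decide (p < x) && pvChk xs (some x)

theorem pvGoA_eq_chk (ws : List String) (prev : Option Int) :
    pvGoA ws prev = pvChk (ws.filterMap PySem.Int.ofStr?) prev := by
  induction ws generalizing prev with
  | nil => rfl
  | cons w ws ih =>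
    cases h : PySem.Int.ofStr? w with
    | none => simp [pvGoA, h, ih]
    | some i =>
      cases prev with
      | none => simp [pvGoA, h, ih, pvChk]
      | some p =>
        by_cases hp : i > p <;> simp [pvGoA, h, ih, pvChk, hp]

theorem pvChk_some (l : List Int) (p : Int) :
    pvChk l (some p) = (((p :: l).zip l).all (fun q => decide (q.1 < q.2))) := by
  induction l generalizing p with
  | nil => rfl
  | cons x xs ih => simp [pvChk, ih]

theorem pvChk_none (l : List Int) :
    pvChk l none = ((l.zip (l.drop 1)).all (fun q => decide (q.1 < q.2))) := by
  cases l with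
  | nil => rfl
  | cons x xs => simpa [pvChk] using pvChk_some xs x

-- ===== VERDICT =====
theorem areNumbersAscending_spec : Claim_equal_areNumbersAscending := by
  intro s _
  unfold Spec_areNumbersAscending areNumbersAscending areNumbersAscending_alt
  rw [pvGoA_eq_chk, pvChk_none]
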